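-- pv_equiv track=rewrite | github.com/bucknerj/jenkins_scripts | scripts/grader.py | is_test_error
-- ===== SOURCE A (Python) =====
-- def is_error_line(l):
--     error_line = ''
--     test_line = l.strip().casefold()
--     if ((not 'echo' in test_line)
--         and (not test_line.startswith('!'))
--         and ('abnormal termination' in test_line)):
--         error_line = l
--
--     return error_line
--
-- def is_normal_stop(l):
--     end_line = ''
--     test_line = l.strip().casefold()
--     if test_line.startswith('normal termination'):
--         end_line = l
--
--     return end_line
--
-- def is_test_error(test_lines):
--     error_list = [l for l in test_lines if is_error_line(l)]
--     error_lines = '\n'.join(error_list)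
--
--     stop_list = []
--     if not error_lines:
--         stop_list = [l for l in test_lines if is_normal_stop(l)]
--
--     if not error_lines and not stop_list:
--         error_lines = 'no termination'
--
--     return error_lines
-- ===== SOURCE B (Python) =====
-- def is_test_error(test_lines):
--     result = ''
--     stop_seen = False
--     for l in test_lines:
--         t = l.strip().casefold()
--         if ('echo' not in t) and (not t.startswith('!')) and ('abnormal termination' in t):
--             result = l if not result else result + '\n' + l
--         elif t.startswith('normal termination'):
--             stop_seen = True
--     if not result and not stop_seen:
--         result = 'no termination'
--     return result
-- ===== Notes on version B (the rewrite author's own statement) =====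
-- stated objective: alternative
-- what changed: B replaces A's two conditionally-run list comprehensions plus '\n'.join with a single pass over the lines that grows the joined error string incrementally and keeps a normal-termination flag, deciding the result from that state.
import Mathlib
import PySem

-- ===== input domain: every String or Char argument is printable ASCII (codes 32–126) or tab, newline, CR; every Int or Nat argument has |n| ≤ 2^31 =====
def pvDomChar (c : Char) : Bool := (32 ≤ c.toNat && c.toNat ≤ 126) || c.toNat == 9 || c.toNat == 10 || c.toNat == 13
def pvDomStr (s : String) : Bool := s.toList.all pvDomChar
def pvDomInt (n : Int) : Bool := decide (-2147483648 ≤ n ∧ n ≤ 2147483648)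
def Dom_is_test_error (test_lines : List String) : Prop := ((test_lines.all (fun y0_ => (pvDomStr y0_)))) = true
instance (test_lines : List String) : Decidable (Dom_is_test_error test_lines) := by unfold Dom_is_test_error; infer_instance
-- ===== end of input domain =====

-- B fuses A's two comprehensions + join into one pass keeping a growing result string and a stop flag (objective: alternative decomposition, same cost).


-- ===== PORT A =====
-- casefold on the ASCII domain coincides with lower (exact on Dom)
def is_error_line (l : String) : String :=
  let error_line := ""
  let test_line := PySem.Str.lower (PySem.Str.strip l)
  if (!(PySem.Str.isIn "echo" test_line))
      && (!(PySem.Str.startswith test_line "!"))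
      && (PySem.Str.isIn "abnormal termination" test_line) then l
  else error_line

def is_normal_stop (l : String) : String :=
  let end_line := ""
  let test_line := PySem.Str.lower (PySem.Str.strip l)
  if PySem.Str.startswith test_line "normal termination" then l
  else end_line

def is_test_error (test_lines : List String) : String :=
  let error_list := test_lines.filter (fun l => is_error_line l != "")
  let error_lines := PySem.Str.join "\n" error_list
  let stop_list := if error_lines = "" then test_lines.filter (fun l => is_normal_stop l != "") else []
  if error_lines = "" ∧ stop_list = [] then "no termination" else error_lines

-- ===== PORT B =====
def altStep (st : String × Bool) (l : String) : String × Bool :=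
  let t := PySem.Str.lower (PySem.Str.strip l)
  if (!(PySem.Str.isIn "echo" t))
      && (!(PySem.Str.startswith t "!"))
      && (PySem.Str.isIn "abnormal termination" t) then
    (if st.1 = "" then l else st.1 ++ "\n" ++ l, st.2)
  else if PySem.Str.startswith t "normal termination" then (st.1, true)
  else st

def is_test_error_alt (test_lines : List String) : String :=
  let st := test_lines.foldl altStep ("", false)
  if st.1 = "" ∧ st.2 = false then "no termination" else st.1

-- ===== PRECONDITION & SPEC =====
def Spec_is_test_error (test_lines : List String) (out : String) : Prop := out = is_test_error_alt test_lines
instance (test_lines : List String) (out : String) : Decidable (Spec_is_test_error test_lines out) := by unfold Spec_is_test_error; infer_instance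

-- ===== CLAIM (what is proved, stated in full; the proofs are below) =====
def Claim_equal_is_test_error : Prop := ∀ (test_lines : List String), Dom_is_test_error test_lines → Spec_is_test_error test_lines (is_test_error test_lines)

-- ===== LEMMAS AND PROOFS =====

def errB (l : String) : Bool :=
  let t := PySem.Str.lower (PySem.Str.strip l)
  (!(PySem.Str.isIn "echo" t)) && (!(PySem.Str.startswith t "!")) && (PySem.Str.isIn "abnormal termination" t)

def stopB (l : String) : Bool :=
  PySem.Str.startswith (PySem.Str.lower (PySem.Str.strip l)) "normal termination"

def J (r : String) (es : List String) : String :=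
  es.foldl (fun r l => if r = "" then l else r ++ "\n" ++ l) r

theorem J_cons (r x : String) (es : List String) :
    J r (x :: es) = J (if r = "" then x else r ++ "\n" ++ x) es := rfl

theorem err_ne_empty (l : String) (h : errB l = true) : l ≠ "" := by
  intro he; subst he; exact absurd h (by decide)

theorem stop_ne_empty (l : String) (h : stopB l = true) : l ≠ "" := by
  intro he; subst he; exact absurd h (by decide)

theorem is_error_line_ne (l : String) : (is_error_line l != "") = errB l := by
  unfold is_error_line
  by_cases h : errB l = true
  · rw [show (PySem.Str.lower (PySem.Str.strip l)) = (PySem.Str.lower (PySem.Str.strip l)) from rfl]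
    simp only [show ((!(PySem.Str.isIn "echo" (PySem.Str.lower (PySem.Str.strip l))))
      && (!(PySem.Str.startswith (PySem.Str.lower (PySem.Str.strip l)) "!"))
      && (PySem.Str.isIn "abnormal termination" (PySem.Str.lower (PySem.Str.strip l)))) = errB l from rfl]
    simp [h, err_ne_empty l h]
  · simp only [show ((!(PySem.Str.isIn "echo" (PySem.Str.lower (PySem.Str.strip l))))
      && (!(PySem.Str.startswith (PySem.Str.lower (PySem.Str.strip l)) "!"))
      && (PySem.Str.isIn "abnormal termination" (PySem.Str.lower (PySem.Str.strip l)))) = errB l from rfl]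
    simp [h]

theorem is_normal_stop_ne (l : String) : (is_normal_stop l != "") = stopB l := by
  unfold is_normal_stop
  simp only [show (PySem.Str.startswith (PySem.Str.lower (PySem.Str.strip l)) "normal termination") = stopB l from rfl]
  by_cases h : stopB l = true
  · simp [h, stop_ne_empty l h]
  · simp [h]

theorem altStep_eq (st : String × Bool) (l : String) :
    altStep st l =
      if errB l then (if st.1 = "" then l else st.1 ++ "\n" ++ l, st.2)
      else if stopB l then (st.1, true) else st := rfl

theorem foldl_altStep (xs : List String) : ∀ (r : String) (s : Bool),
    xs.foldl altStep (r, s) =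
      (J r (xs.filter errB), s || xs.any (fun l => !errB l && stopB l)) := by
  induction xs with
  | nil => intro r s; simp [J]
  | cons x xs ih =>
    intro r s
    rw [List.foldl_cons, altStep_eq]
    by_cases hx : errB x = true
    · simp [hx, ih, J_cons]
    · by_cases hs : stopB x = true
      · simp [hx, hs, ih]
      · simp [hx, hs, ih]

theorem ne_empty_append (r l : String) (_h : r ≠ "") : r ++ "\n" ++ l ≠ "" := by
  intro he
  have := congrArg String.toList he
  simp at this

theorem J_ne_empty (es : List String) : ∀ (r : String), r ≠ "" → J r es ≠ "" := by
  induction es with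
  | nil => intro r h; simpa [J] using h
  | cons e es ih =>
    intro r h
    rw [show J r (e :: es) = J (r ++ "\n" ++ e) es from by simp [J, if_neg h]]
    exact ih _ (ne_empty_append r e h)

theorem J_eq_join (es : List String) : ∀ (r : String), r ≠ "" →
    J r es = PySem.Str.join "\n" (r :: es) := by
  induction es with
  | nil =>
    intro r _
    apply String.toList_injective
    simp [J, PySem.Chars.join_singleton]
  | cons e es ih =>
    intro r h
    rw [show J r (e :: es) = J (r ++ "\n" ++ e) es from by simp [J, if_neg h]]
    rw [ih (r ++ "\n" ++ e) (ne_empty_append r e h)]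
    apply String.toList_injective
    cases es <;>
      simp [PySem.Chars.join_singleton, PySem.Chars.join_cons_cons]

-- ===== VERDICT (by name: the statement is the Claim_ definition above) =====
theorem is_test_error_spec : Claim_equal_is_test_error := by
  intro xs _
  unfold Spec_is_test_error is_test_error is_test_error_alt
  rw [List.filter_congr (fun l _ => is_error_line_ne l),
      List.filter_congr (fun l _ => is_normal_stop_ne l),
      foldl_altStep]
  cases hE : xs.filter errB with
  | nil =>
    have hnoerr := List.filter_eq_nil_iff.mp hE
    have hany : (xs.any fun l => !errB l && stopB l) = xs.any stopB := by
      cases h1 : xs.any stopB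
      · simp only [List.any_eq_false] at h1 ⊢
        intro l hl
        simp [h1 l hl]
      · obtain ⟨l, hl, hsl⟩ := List.any_eq_true.mp h1
        exact List.any_eq_true.mpr ⟨l, hl, by simp [hnoerr l hl, hsl]⟩
    have hjoin : PySem.Str.join "\n" ([] : List String) = "" := by
      apply String.toList_injective
      simp [PySem.Chars.join_nil]
    by_cases hstop : xs.any stopB = true
    · obtain ⟨l, hl, hsl⟩ := List.any_eq_true.mp hstop
      have hne : xs.filter stopB ≠ [] := by
        intro hh
        exact absurd hsl (by simpa using List.filter_eq_nil_iff.mp hh l hl)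
      simp [J, hjoin, hany, hstop, hne]
    · have hb : xs.any stopB = false := by
        cases h : xs.any stopB
        · rfl
        · exact absurd h hstop
      have h2 : xs.filter stopB = [] :=
        List.filter_eq_nil_iff.mpr (List.any_eq_false.mp hb)
      simp [J, hjoin, hany, hb, h2]
  | cons e es =>
    have hmem : e ∈ xs.filter errB := hE ▸ List.mem_cons_self
    have he : errB e = true := (List.mem_filter.mp hmem).2
    have hene : e ≠ "" := err_ne_empty e he
    have hJne : J e es ≠ "" := J_ne_empty es e hene
    have hjoin : PySem.Str.join "\n" (e :: es) = J e es := (J_eq_join es e hene).symm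
    simp [hjoin, J_cons, hJne]
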